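-- pv_equiv track=rewrite | github.com/rjmurillo/ai-agents | scripts/ai_review_common/quality_gate.py | merge_verdicts
-- ===== SOURCE A (Python) =====
-- FAIL_VERDICTS = frozenset({"CRITICAL_FAIL", "REJECTED", "FAIL", "NEEDS_REVIEW"})
--
-- def merge_verdicts(verdicts: list[str]) -> str:
--     """Aggregate multiple verdicts: CRITICAL_FAIL/REJECTED/FAIL/NEEDS_REVIEW > WARN > PASS."""
--     if not verdicts:
--         return "PASS"
--
--     for v in verdicts:
--         if v in FAIL_VERDICTS:
--             return "CRITICAL_FAIL"
--
--     if "WARN" in verdicts: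
--         return "WARN"
--
--     return "PASS"
-- ===== SOURCE B (Python) =====
-- FAIL_VERDICTS = frozenset({"CRITICAL_FAIL", "REJECTED", "FAIL", "NEEDS_REVIEW"})
--
-- def _rank(v):
--     return 2 if v in FAIL_VERDICTS else (1 if v == "WARN" else 0)
--
-- def merge_verdicts(verdicts: list[str]) -> str:
--     """Aggregate verdicts by reducing to the maximum priority rank."""
--     m = max(map(_rank, verdicts), default=0)
--     return ("PASS", "WARN", "CRITICAL_FAIL")[m]
-- ===== Notes on version B (the rewrite author's own statement) =====
-- stated objective: simpler
-- what changed: Replaces A's two separate short-circuit membership scans by a single reduction: map each verdict to a priority rank, take the maximum (default 0 on empty), and index the result table.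
import Mathlib
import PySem

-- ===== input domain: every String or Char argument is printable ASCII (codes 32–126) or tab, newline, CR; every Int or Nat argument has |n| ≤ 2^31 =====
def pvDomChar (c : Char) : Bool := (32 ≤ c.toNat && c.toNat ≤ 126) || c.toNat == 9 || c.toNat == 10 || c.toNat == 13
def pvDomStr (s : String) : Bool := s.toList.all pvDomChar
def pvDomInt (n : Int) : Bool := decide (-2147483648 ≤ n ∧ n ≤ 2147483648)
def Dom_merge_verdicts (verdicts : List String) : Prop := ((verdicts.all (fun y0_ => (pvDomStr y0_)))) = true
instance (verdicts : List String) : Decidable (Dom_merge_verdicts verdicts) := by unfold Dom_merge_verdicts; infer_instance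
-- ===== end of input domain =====

-- B replaces A's two short-circuit membership scans by one reduction to a maximum
-- priority rank, mapped back through a table (objective: simpler).

-- ===== PORT A =====
-- FAIL_VERDICTS = frozenset({...})
def FAIL_VERDICTS : PySem.Set String :=
  PySem.Set.ofList ["CRITICAL_FAIL", "REJECTED", "FAIL", "NEEDS_REVIEW"]

def merge_verdicts (verdicts : List String) : String :=
  if verdicts = [] then "PASS"
  else if verdicts.any (fun v => PySem.Set.contains FAIL_VERDICTS v) then "CRITICAL_FAIL"
  else if verdicts.contains "WARN" then "WARN"
  else "PASS"

-- ===== PORT B =====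
def pvRank (v : String) : Nat :=
  if PySem.Set.contains FAIL_VERDICTS v then 2 else if v = "WARN" then 1 else 0

def merge_verdicts_alt (verdicts : List String) : String :=
  let m := verdicts.foldl (fun a v => max a (pvRank v)) 0
  if m = 2 then "CRITICAL_FAIL" else if m = 1 then "WARN" else "PASS"

-- ===== PRECONDITION & SPEC =====
def Spec_merge_verdicts (verdicts : List String) (out : String) : Prop := out = merge_verdicts_alt verdicts
instance (verdicts : List String) (out : String) : Decidable (Spec_merge_verdicts verdicts out) := by unfold Spec_merge_verdicts; infer_instance

-- ===== CLAIM (what is proved, stated in full; the proofs are below) =====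
def Claim_equal_merge_verdicts : Prop := ∀ (verdicts : List String), Dom_merge_verdicts verdicts → Spec_merge_verdicts verdicts (merge_verdicts verdicts)

-- ===== LEMMAS AND PROOFS =====

-- pull the accumulator out of B's fold
theorem foldl_max_rank (l : List String) (a : Nat) :
    l.foldl (fun a v => max a (pvRank v)) a = max a (l.foldl (fun a v => max a (pvRank v)) 0) := by
  induction l generalizing a with
  | nil => simp
  | cons v t ih =>
    simp only [List.foldl_cons]
    rw [ih (max a (pvRank v)), ih (max 0 (pvRank v))]
    omega

-- characterisation of B's maximum rank by A's two scans
theorem maxRank_eq (l : List String) :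
    l.foldl (fun a v => max a (pvRank v)) 0 =
      if l.any (fun v => PySem.Set.contains FAIL_VERDICTS v) then 2
      else if l.contains "WARN" then 1 else 0 := by
  induction l with
  | nil => simp
  | cons v t ih =>
    rw [List.foldl_cons, foldl_max_rank, ih, List.any_cons, List.contains_cons]
    cases hf : PySem.Set.contains FAIL_VERDICTS v with
    | true =>
      have hr : pvRank v = 2 := by unfold pvRank; rw [hf]; rfl
      simp only [hr, Bool.true_or, if_true]
      split_ifs <;> omega
    | false =>
      simp only [Bool.false_or]
      cases hw : (("WARN" : String) == v) with
      | true =>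
        have hv : v = "WARN" := (beq_iff_eq.mp hw).symm
        have hr : pvRank v = 1 := by subst hv; decide
        simp only [hr, Bool.true_or, if_true]
        split_ifs <;> omega
      | false =>
        have hv : v ≠ "WARN" := fun h => by subst h; simp at hw
        have hr : pvRank v = 0 := by unfold pvRank; rw [hf, if_neg hv]; rfl
        simp only [hr, Bool.false_or]
        split_ifs <;> omega

-- ===== VERDICT (by name: the statement is the Claim_ definition above) =====
theorem merge_verdicts_spec : Claim_equal_merge_verdicts := by
  intro verdicts _
  unfold Spec_merge_verdicts merge_verdicts merge_verdicts_alt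
  rw [maxRank_eq]
  rcases verdicts with _ | ⟨v, t⟩
  · simp
  · simp only [reduceCtorEq, if_false]
    split_ifs <;> simp_all
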